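-- pv_equiv track=rewrite | github.com/misaya-yang/hybrid-rope | archives/server_artifacts_2026-02-13/a800/scripts/analyze_rope_surrogate_phaseA.py | select_default_names
-- ===== SOURCE A (Python) =====
-- from typing import Any, Dict, List, Tuple
--
-- def select_default_names(candidates: Dict[str, Dict[str, Any]]) -> List[str]:
--     names: List[str] = []
--     names.extend(sorted([n for n in candidates if n.startswith("geom_theta_")]))
--     if "bimodal_heuristic" in candidates:
--         names.append("bimodal_heuristic")
--     cosd = sorted([n for n in candidates if n.startswith("cosd_")])
--     names.extend(cosd[:2])
--     return names
-- ===== SOURCE B (Python) =====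
-- def _note_min(m1, m2, n):
--     """Fold step: keep the two smallest distinct values seen so far."""
--     if m1 is None or n < m1:
--         return n, m1
--     if m2 is None or n < m2:
--         return m1, n
--     return m1, m2
--
--
-- def _insort(xs, n):
--     """Insert n into the sorted list xs, keeping it sorted (no full sort ever runs)."""
--     i = 0
--     while i < len(xs) and xs[i] < n:
--         i += 1
--     xs.insert(i, n)
--
--
-- def select_default_names(candidates):
--     names = []
--     has_bimodal = False
--     m1 = m2 = None
--     for n in candidates:
--         if n.startswith("geom_theta_"):
--             _insort(names, n)
--         elif n == "bimodal_heuristic":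
--             has_bimodal = True
--         elif n.startswith("cosd_"):
--             m1, m2 = _note_min(m1, m2, n)
--     if has_bimodal:
--         names.append("bimodal_heuristic")
--     for m in (m1, m2):
--         if m is not None:
--             names.append(m)
--     return names
-- ===== Notes on version B (the rewrite author's own statement) =====
-- stated objective: alternative
-- what changed: B never calls sort: in one pass over the keys it maintains the geom_theta_ block by incremental sorted insertion, a bimodal flag, and the two smallest cosd_ names via a running two-minima scan, replacing A's two filtered-list sorts and [:2] slice.
import Mathlib
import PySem

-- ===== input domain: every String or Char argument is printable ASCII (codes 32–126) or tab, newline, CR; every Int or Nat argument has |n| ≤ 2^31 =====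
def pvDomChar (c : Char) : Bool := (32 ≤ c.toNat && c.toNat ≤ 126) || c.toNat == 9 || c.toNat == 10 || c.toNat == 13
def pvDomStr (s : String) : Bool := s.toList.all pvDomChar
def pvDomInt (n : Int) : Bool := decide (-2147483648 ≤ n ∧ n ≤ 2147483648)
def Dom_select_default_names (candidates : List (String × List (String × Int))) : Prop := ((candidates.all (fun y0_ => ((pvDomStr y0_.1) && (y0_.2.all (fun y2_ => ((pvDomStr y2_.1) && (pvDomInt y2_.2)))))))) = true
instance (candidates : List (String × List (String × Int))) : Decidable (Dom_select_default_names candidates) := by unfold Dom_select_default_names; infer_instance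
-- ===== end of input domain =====

-- B never sorts: one pass over the keys keeps the geom_theta_ block by incremental
-- sorted insertion, a bimodal flag, and the two smallest cosd_ names by a running
-- two-minima scan; objective: alternative algorithm (no full sort, no slice).

-- ===== PORT A =====
def select_default_names (candidates : List (String × List (String × Int))) : List String :=
  -- iterating / membership-testing the dict uses its keys: first occurrences, in order
  let keys := PySem.List.dedup (candidates.map Prod.fst)
  let names : List String := []
  let names := names ++ PySem.List.sorted (keys.filter (fun n => PySem.Str.startswith n "geom_theta_")) (fun x => x) false
  let names := if decide ("bimodal_heuristic" ∈ keys) then names ++ ["bimodal_heuristic"] else names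
  let cosd := PySem.List.sorted (keys.filter (fun n => PySem.Str.startswith n "cosd_")) (fun x => x) false
  names ++ PySem.List.slice cosd none (some 2)

-- ===== PORT B =====
-- helper _note_min: keep the two smallest distinct values seen so far
def sdnNoteMin (m1 m2 : Option String) (n : String) : Option String × Option String :=
  match m1 with
  | none => (some n, m1)
  | some a =>
    if n < a then (some n, m1)
    else
      match m2 with
      | none => (some a, some n)
      | some c => if n < c then (some a, some n) else (m1, m2)

-- helper _insort: insert n into the sorted list xs, keeping it sorted
-- (the while loop skipping elements < n becomes the obvious structural recursion)
def sdnInsort (xs : List String) (n : String) : List String :=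
  match xs with
  | [] => [n]
  | x :: rest => if x < n then x :: sdnInsort rest n else n :: x :: rest

def sdnStep (st : List String × Bool × Option String × Option String) (n : String) :
    List String × Bool × Option String × Option String :=
  if PySem.Str.startswith n "geom_theta_" then (sdnInsort st.1 n, st.2)
  else if n == "bimodal_heuristic" then (st.1, true, st.2.2)
  else if PySem.Str.startswith n "cosd_" then
    (st.1, st.2.1, sdnNoteMin st.2.2.1 st.2.2.2 n)
  else st

def select_default_names_alt (candidates : List (String × List (String × Int))) : List String :=
  let keys := PySem.List.dedup (candidates.map Prod.fst)
  let st := keys.foldl sdnStep ([], false, none, none)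
  let names := if st.2.1 then st.1 ++ ["bimodal_heuristic"] else st.1
  let names := match st.2.2.1 with | some a => names ++ [a] | none => names
  match st.2.2.2 with | some a => names ++ [a] | none => names

-- ===== PRECONDITION & SPEC =====
def Spec_select_default_names (candidates : List (String × List (String × Int))) (out : List String) : Prop := out = select_default_names_alt candidates
instance (candidates : List (String × List (String × Int))) (out : List String) : Decidable (Spec_select_default_names candidates out) := by unfold Spec_select_default_names; infer_instance

-- ===== CLAIM (what is proved, stated in full; the proofs are below) =====
def Claim_equal_select_default_names : Prop := ∀ (candidates : List (String × List (String × Int))), Dom_select_default_names candidates → Spec_select_default_names candidates (select_default_names candidates)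

-- ===== LEMMAS AND PROOFS =====

lemma cosd_not_geom (n : String) (h : PySem.Str.startswith n "cosd_" = true) :
    PySem.Str.startswith n "geom_theta_" = false := by
  simp only [PySem.Str.startswith_eq] at *
  rw [PySem.Chars.startswith_iff] at h
  by_contra hb
  rw [Bool.not_eq_false, PySem.Chars.startswith_iff] at hb
  have hpp : "cosd_".toList <+: "geom_theta_".toList :=
    List.prefix_of_prefix_length_le h hb (by decide)
  exact absurd hpp (by decide)

lemma geom_ne_bimodal (n : String) (h : PySem.Str.startswith n "geom_theta_" = true) :
    n ≠ "bimodal_heuristic" := by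
  intro hb; subst hb; revert h; decide

-- the first two entries of a list, as B's (m1, m2) state
def sdnPair (s : List String) : Option String × Option String :=
  match s with
  | [] => (none, none)
  | [a] => (some a, none)
  | a :: b :: _ => (some a, some b)

lemma insort_perm (s : List String) (n : String) : (sdnInsort s n).Perm (n :: s) := by
  induction s with
  | nil => simp [sdnInsort]
  | cons x rest ih =>
    simp only [sdnInsort]
    split_ifs with h
    · exact ((ih.cons x).trans (List.Perm.swap n x rest))
    · rfl

lemma insort_pairwise (s : List String) (n : String) (hs : s.Pairwise (· < ·)) (hn : n ∉ s) :
    (sdnInsort s n).Pairwise (· < ·) := by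
  induction s with
  | nil => simp [sdnInsort]
  | cons x rest ih =>
    rcases List.pairwise_cons.mp hs with ⟨hx, hrest⟩
    simp only [List.mem_cons, not_or] at hn
    simp only [sdnInsort]
    split_ifs with h
    · refine List.pairwise_cons.mpr ⟨?_, ih hrest hn.2⟩
      intro y hy
      rcases List.mem_cons.mp ((insort_perm rest n).mem_iff.mp hy) with rfl | h'
      · exact h
      · exact hx y h'
    · have hxn : n < x := lt_of_le_of_ne (not_lt.mp h) (fun e => hn.1 e)
      refine List.pairwise_cons.mpr ⟨?_, hs⟩
      intro y hy
      rcases List.mem_cons.mp hy with rfl | h'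
      · exact hxn
      · exact lt_trans hxn (hx y h')

lemma foldl_insort_perm (l : List String) (g : List String) :
    (l.foldl sdnInsort g).Perm (g ++ l) := by
  induction l generalizing g with
  | nil => simp
  | cons x l ih =>
    refine (ih (sdnInsort g x)).trans ?_
    exact ((insort_perm g x).append_right l).trans List.perm_middle.symm

lemma foldl_insort_pairwise (l : List String) (g : List String)
    (hnd : (g ++ l).Nodup) (hg : g.Pairwise (· < ·)) :
    (l.foldl sdnInsort g).Pairwise (· < ·) := by
  induction l generalizing g with
  | nil => simpa using hg
  | cons x l ih =>
    have hnd2 : (x :: (g ++ l)).Nodup := List.perm_middle.nodup hnd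
    rcases List.nodup_cons.mp hnd2 with ⟨hxgl, hgl⟩
    have hxg : x ∉ g := fun h => hxgl (List.mem_append.mpr (Or.inl h))
    have hnd3 : (sdnInsort g x ++ l).Nodup :=
      ((((insort_perm g x).append_right l).trans List.perm_middle.symm).symm).nodup hnd
    exact ih (sdnInsort g x) hnd3 (insort_pairwise g x hg hxg)

lemma foldl_insort_sorted (l : List String) (hl : l.Nodup) :
    l.foldl sdnInsort [] = PySem.List.sorted l (fun x => x) false := by
  exact (PySem.List.sorted_eq_of_perm_of_pairwise_lt l (l.foldl sdnInsort []) (fun x => x)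
    (by simpa using foldl_insort_perm l [])
    (foldl_insort_pairwise l [] (by simpa using hl) (by simp))).symm

lemma noteMin_insort (s : List String) (n : String) (hs : s.Pairwise (· < ·)) (hn : n ∉ s) :
    sdnNoteMin (sdnPair s).1 (sdnPair s).2 n = sdnPair (sdnInsort s n) := by
  match s with
  | [] => simp [sdnPair, sdnNoteMin, sdnInsort]
  | [a] =>
    have hna : n ≠ a := by simpa using hn
    rcases lt_or_gt_of_ne hna with h | h
    · simp [sdnPair, sdnNoteMin, sdnInsort, h, not_lt_of_gt h]
    · simp [sdnPair, sdnNoteMin, sdnInsort, h, not_lt_of_gt h]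
  | a :: b :: t =>
    have hab : a < b := (List.pairwise_cons.mp hs).1 b List.mem_cons_self
    simp only [List.mem_cons, not_or] at hn
    rcases lt_trichotomy n a with h | h | h
    · simp [sdnPair, sdnNoteMin, sdnInsort, h, not_lt_of_gt h]
    · exact absurd h hn.1
    · rcases lt_trichotomy n b with h2 | h2 | h2
      · simp [sdnPair, sdnNoteMin, sdnInsort, h, h2, not_lt_of_gt h, not_lt_of_gt h2]
      · exact absurd h2 hn.2.1
      · have hins : sdnInsort (a :: b :: t) n = a :: b :: sdnInsort t n := by
          simp only [sdnInsort, if_pos h, if_pos h2]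
        simp [sdnPair, sdnNoteMin, hins, not_lt_of_gt h, not_lt_of_gt h2]

lemma foldl_noteMin (l : List String) (hl : l.Nodup) :
    l.foldl (fun m n => sdnNoteMin m.1 m.2 n) (none, none) = sdnPair (l.foldl sdnInsort []) := by
  induction l using List.reverseRecOn with
  | nil => rfl
  | append_singleton l n ih =>
    have hnd2 : (n :: (l ++ ([] : List String))).Nodup := List.perm_middle.nodup hl
    rcases List.nodup_cons.mp hnd2 with ⟨hnl', hl'⟩
    have hnl : n ∉ l := fun h => hnl' (List.mem_append.mpr (Or.inl h))
    have hlnd : l.Nodup := by simpa using hl'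
    rw [List.foldl_append, List.foldl_append, ih hlnd]
    simp only [List.foldl_cons, List.foldl_nil]
    refine noteMin_insort _ n ?_ ?_
    · simpa using foldl_insort_pairwise l [] (by simpa using hlnd) (by simp)
    · intro h
      exact hnl (by simpa using (foldl_insort_perm l []).mem_iff.mp h)

lemma sdn_fold_decomp (l : List String) (g : List String) (b : Bool) (m : Option String × Option String) :
    l.foldl sdnStep (g, b, m) =
      ((l.filter (fun n => PySem.Str.startswith n "geom_theta_")).foldl sdnInsort g,
       b || decide (("bimodal_heuristic" : String) ∈ l),
       (l.filter (fun n => PySem.Str.startswith n "cosd_")).foldl (fun m n => sdnNoteMin m.1 m.2 n) m) := by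
  induction l generalizing g b m with
  | nil => simp
  | cons x l ih =>
    by_cases hg : PySem.Str.startswith x "geom_theta_" = true
    · have hc : PySem.Str.startswith x "cosd_" = false := by
        by_contra hcc
        rw [Bool.not_eq_false] at hcc
        rw [cosd_not_geom x hcc] at hg
        exact Bool.false_ne_true hg
      have hbx : ("bimodal_heuristic" : String) ≠ x := fun h => (geom_ne_bimodal x hg) h.symm
      have hstep : sdnStep (g, b, m) x = (sdnInsort g x, b, m) := by
        simp only [sdnStep, hg, if_true]
      have hm : decide (("bimodal_heuristic" : String) ∈ x :: l)
          = decide (("bimodal_heuristic" : String) ∈ l) := by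
        rw [decide_eq_decide]; simp [hbx]
      simp only [List.foldl_cons, hstep, List.filter_cons, hg, hc, if_true,
        Bool.false_eq_true, if_false, ih, hm]
    · simp only [Bool.not_eq_true] at hg
      by_cases hxb : x = "bimodal_heuristic"
      · subst hxb
        have hstep : sdnStep (g, b, m) ("bimodal_heuristic" : String) = (g, true, m) := rfl
        have hgf : PySem.Str.startswith ("bimodal_heuristic" : String) "geom_theta_" = false := by decide
        have hcf : PySem.Str.startswith ("bimodal_heuristic" : String) "cosd_" = false := by decide
        have hm : decide (("bimodal_heuristic" : String) ∈ ("bimodal_heuristic" : String) :: l) = true := by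
          simp
        simp only [List.foldl_cons, hstep, List.filter_cons, hgf, hcf,
          Bool.false_eq_true, if_false, ih, hm, Bool.or_true, Bool.true_or]
      · have hbx : ("bimodal_heuristic" : String) ≠ x := fun h => hxb h.symm
        have hm : decide (("bimodal_heuristic" : String) ∈ x :: l)
            = decide (("bimodal_heuristic" : String) ∈ l) := by
          rw [decide_eq_decide]; simp [hbx]
        by_cases hc : PySem.Str.startswith x "cosd_" = true
        · have hstep : sdnStep (g, b, m) x = (g, b, sdnNoteMin m.1 m.2 x) := by
            simp only [sdnStep, hg, Bool.false_eq_true, if_false, beq_iff_eq, hxb, hc, if_true]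
          simp only [List.foldl_cons, hstep, List.filter_cons, hg, hc, if_true,
            Bool.false_eq_true, if_false, ih, hm]
        · simp only [Bool.not_eq_true] at hc
          have hstep : sdnStep (g, b, m) x = (g, b, m) := by
            simp only [sdnStep, hg, hc, Bool.false_eq_true, if_false, beq_iff_eq, hxb]
          simp only [List.foldl_cons, hstep, List.filter_cons, hg, hc,
            Bool.false_eq_true, if_false, ih, hm]

-- ===== VERDICT (by name: the statement is the Claim_ definition above) =====
theorem select_default_names_spec : Claim_equal_select_default_names := by
  intro candidates _
  unfold Spec_select_default_names
  simp only [select_default_names, select_default_names_alt, PySem.List.dedup_eq_ofList]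
  have hnd : (PySem.Set.ofList (candidates.map Prod.fst)).Nodup := PySem.Set.nodup_ofList _
  rw [sdn_fold_decomp]
  rw [foldl_insort_sorted ((PySem.Set.ofList (candidates.map Prod.fst)).filter
    (fun n => PySem.Str.startswith n "geom_theta_")) (hnd.filter _)]
  rw [foldl_noteMin ((PySem.Set.ofList (candidates.map Prod.fst)).filter
    (fun n => PySem.Str.startswith n "cosd_")) (hnd.filter _)]
  rw [foldl_insort_sorted ((PySem.Set.ofList (candidates.map Prod.fst)).filter
    (fun n => PySem.Str.startswith n "cosd_")) (hnd.filter _)]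
  have hsl : ∀ (ys : List String), PySem.List.slice ys none (some 2) = ys.take 2 := by
    intro ys; simp [pysem]
  rw [hsl]
  simp only [Bool.false_or]
  cases PySem.List.sorted ((PySem.Set.ofList (candidates.map Prod.fst)).filter
      (fun n => PySem.Str.startswith n "cosd_")) (fun x => x) false with
  | nil =>
    by_cases hb : ("bimodal_heuristic" : String) ∈ PySem.Set.ofList (candidates.map Prod.fst) <;>
      simp [sdnPair, hb]
  | cons a t =>
    cases t with
    | nil =>
      by_cases hb : ("bimodal_heuristic" : String) ∈ PySem.Set.ofList (candidates.map Prod.fst) <;>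
        simp [sdnPair, hb]
    | cons b' t' =>
      by_cases hb : ("bimodal_heuristic" : String) ∈ PySem.Set.ofList (candidates.map Prod.fst) <;>
        simp [sdnPair, hb]
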